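-- pv_equiv track=rewrite | github.com/khyunchoi/TIL | record_of_the_day/220703/test1.py | solution
-- ===== SOURCE A (Python) =====
-- def solution(grade):
--     answer = 0
--
--     min_val = float('inf')
--     for i in range(len(grade)-1, -1, -1):
--         min_val = min(min_val, grade[i])
--         if grade[i] > min_val:
--             answer += grade[i] - min_val
--
--     return answer
-- ===== SOURCE B (Python) =====
-- def solution(grade):
--     # Left-to-right monotone stack of (value, count): after processing a prefix,
--     # the stack holds the compressed multiset of current suffix-minima
--     # min(prefix[i:]) for each index i.  answer = sum(grade) - sum of suffix minima.
--     stack = []  # values strictly decreasing from top to bottom of future pops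
--     for x in grade:
--         c = 1
--         while stack and stack[-1][0] >= x:
--             _, k = stack.pop()
--             c += k
--         stack.append((x, c))
--     return sum(grade) - sum(v * k for v, k in stack)
-- ===== Notes on version B (the rewrite author's own statement) =====
-- stated objective: alternative
-- what changed: A scans right-to-left keeping a running minimum and conditionally accumulating differences; B scans left-to-right maintaining a monotone stack of (value,count) pairs that compresses the multiset of suffix minima, then returns sum(grade) minus the stack's value*count total.
import Mathlib
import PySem

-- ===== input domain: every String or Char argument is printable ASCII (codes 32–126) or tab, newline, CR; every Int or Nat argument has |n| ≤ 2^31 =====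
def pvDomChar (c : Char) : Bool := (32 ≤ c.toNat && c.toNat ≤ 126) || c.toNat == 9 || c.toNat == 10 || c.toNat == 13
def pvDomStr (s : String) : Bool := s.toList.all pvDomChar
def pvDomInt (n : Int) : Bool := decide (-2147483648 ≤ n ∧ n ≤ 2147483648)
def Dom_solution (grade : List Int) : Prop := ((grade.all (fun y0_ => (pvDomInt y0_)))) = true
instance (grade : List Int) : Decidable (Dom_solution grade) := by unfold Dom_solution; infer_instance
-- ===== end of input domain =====

-- B replaces A's right-to-left running-minimum scan with a left-to-right monotone stack of (value,count) pairs compressing the suffix-minima multiset (alternative algorithm, same cost).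


-- ===== PORT A =====
-- min_val starts as float('inf'); ported as Option Int with none = infinity (exact:
-- min(inf, x) = x, and the comparison 'grade[i] > min_val' only runs after the update,
-- when min_val is a real int).
def solution (grade : List Int) : Int :=
  ((PySem.List.pyRange ((grade.length : Int) - 1) (-1) (-1)).foldl
    (fun (st : Int × Option Int) i =>
      let g := PySem.List.pyGetD grade i 0
      let m : Int := match st.2 with | none => g | some mv => min mv g
      (if g > m then st.1 + (g - m) else st.1, some m)) (0, (none : Option Int))).1

-- ===== PORT B =====
-- the Python 'while stack and stack[-1][0] >= x: …pop…' loop; the stack is stored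
-- top-first (Python's end-of-list = head here), so pop = tail, push = cons.
def popLoop (x : Int) : List (Int × Int) → Int → Int × List (Int × Int)
  | [], c => (c, [])
  | (v, k) :: rest, c => if x ≤ v then popLoop x rest (c + k) else (c, (v, k) :: rest)

def solution_alt (grade : List Int) : Int :=
  let stack := grade.foldl (fun st x =>
    let p := popLoop x st 1
    (x, p.1) :: p.2) []
  grade.sum - stack.foldl (fun a p => a + p.1 * p.2) 0

-- ===== PRECONDITION & SPEC =====
def Spec_solution (grade : List Int) (out : Int) : Prop := out = solution_alt grade
instance (grade : List Int) (out : Int) : Decidable (Spec_solution grade out) := by unfold Spec_solution; infer_instance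

-- ===== CLAIM (what is proved, stated in full; the proofs are below) =====
def Claim_equal_solution : Prop := ∀ (grade : List Int), Dom_solution grade → Spec_solution grade (solution grade)

-- ===== LEMMAS AND PROOFS =====

-- running minimum fed an optional previous min (none = not started / infinity)
def minO (m : Option Int) (x : Int) : Int := match m with | none => x | some mv => min mv x

-- running-minimum table of a list, threading the optional current min
def mins : List Int → Option Int → List Int
  | [], _ => []
  | x :: xs, m => minO m x :: mins xs (some (minO m x))

theorem sum_mins_eq (l : List Int) (m : Option Int) :
    l.sum - (mins l m).sum = (l.foldl
      (fun (st : Int × Option Int) g =>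
        let mv : Int := minO st.2 g
        (if g > mv then st.1 + (g - mv) else st.1, some mv)) (0, m)).1 := by
  suffices h : ∀ (l : List Int) (m : Option Int) (a : Int),
      (l.foldl (fun (st : Int × Option Int) g =>
        let mv : Int := minO st.2 g
        (if g > mv then st.1 + (g - mv) else st.1, some mv)) (a, m)).1
      = a + (l.sum - (mins l m).sum) by
    have := h l m 0; omega
  intro l
  induction l with
  | nil => intro m a; simp [mins]
  | cons x xs ih =>
    intro m a
    simp only [List.foldl_cons, mins, List.sum_cons]
    rw [ih]
    have hle : minO m x ≤ x := by
      cases m with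
      | none => simp [minO]
      | some mv => simp [minO]
    by_cases hx : x > minO m x
    · simp only [if_pos hx]; omega
    · simp only [if_neg hx]; omega

theorem solution_eq_fold (grade : List Int) :
    solution grade = (grade.reverse.foldl
      (fun (st : Int × Option Int) g =>
        let mv : Int := minO st.2 g
        (if g > mv then st.1 + (g - mv) else st.1, some mv)) (0, none)).1 := by
  unfold solution
  have h1 : PySem.List.pyRange ((grade.length : Int) - 1) (-1) (-1)
      = (PySem.List.pyRange 0 (grade.length : Int) 1).reverse := by
    have := PySem.List.pyRange_neg_one_eq_reverse ((grade.length : Int) - 1) (-1)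
    simpa using this
  rw [h1]
  have h2 : (PySem.List.pyRange 0 (grade.length : Int) 1).reverse.foldl
      (fun (st : Int × Option Int) i =>
        let g := PySem.List.pyGetD grade i 0
        let m : Int := match st.2 with | none => g | some mv => min mv g
        (if g > m then st.1 + (g - m) else st.1, some m)) (0, none)
    = ((PySem.List.pyRange 0 (grade.length : Int) 1).map
        (fun i => PySem.List.pyGetD grade i 0)).reverse.foldl
      (fun (st : Int × Option Int) g =>
        let m : Int := minO st.2 g
        (if g > m then st.1 + (g - m) else st.1, some m)) (0, none) := by
    rw [← List.map_reverse, List.foldl_map]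
    rfl
  rw [h2, PySem.List.map_pyGetD_pyRange_zero']

-- A's value is sum(grade) - sum of the running minima of the reversed list
theorem solution_eq_sum_sub (grade : List Int) :
    solution grade = grade.sum - (mins grade.reverse none).sum := by
  rw [solution_eq_fold, ← sum_mins_eq]
  simp

-- mins with a started minimum = map (min x) of mins without it
theorem mins_some_min (xs : List Int) (m x : Int) :
    mins xs (some (min x m)) = (mins xs (some m)).map (min x) := by
  induction xs generalizing m with
  | nil => rfl
  | cons a rest ih =>
    simp only [mins, minO]
    have h : min (min x m) a = min x (min m a) := by omega
    rw [h, ih]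
    simp

theorem mins_some (xs : List Int) (x : Int) :
    mins xs (some x) = (mins xs none).map (min x) := by
  cases xs with
  | nil => rfl
  | cons a rest =>
    simp only [mins, minO, List.map_cons]
    rw [mins_some_min]

-- expansion of the compressed stack into the plain list of suffix minima (top first)
def expand (st : List (Int × Int)) : List Int := st.flatMap (fun p => List.replicate p.2.toNat p.1)

-- the stack-building step of solution_alt
def stepB (st : List (Int × Int)) (x : Int) : List (Int × Int) :=
  let p := popLoop x st 1
  (x, p.1) :: p.2

def buildStack (l : List Int) : List (Int × Int) := l.foldl stepB []

-- popLoop in closed form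
theorem popLoop_eq (x : Int) (st : List (Int × Int)) (c : Int) :
    popLoop x st c = (c + ((st.takeWhile (fun p => decide (x ≤ p.1))).map Prod.snd).sum,
      st.dropWhile (fun p => decide (x ≤ p.1))) := by
  induction st generalizing c with
  | nil => simp [popLoop]
  | cons p rest ih =>
    obtain ⟨v, k⟩ := p
    by_cases h : x ≤ v
    · simp only [popLoop, if_pos h, ih, List.takeWhile_cons, List.dropWhile_cons]
      simp [h]
      omega
    · simp only [popLoop, if_neg h, List.takeWhile_cons, List.dropWhile_cons]
      simp [h]

-- the invariant: expand (buildStack l) is the running-min list of l.reverse,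
-- values strictly decrease top-down, counts are ≥ 1
def StackInv (l : List Int) (st : List (Int × Int)) : Prop :=
  expand st = mins l.reverse none ∧
  (st.map Prod.fst).Pairwise (· > ·) ∧
  ∀ p ∈ st, (1 : Int) ≤ p.2

-- elements of the popped prefix all have value ≥ x
theorem mem_takeWhile_ge (x : Int) (st : List (Int × Int)) (p : Int × Int)
    (h : p ∈ st.takeWhile (fun q => decide (x ≤ q.1))) : x ≤ p.1 := by
  have := List.mem_takeWhile_imp h
  simpa using this

-- with strictly decreasing values, everything left after the pops has value < x
theorem mem_dropWhile_lt (x : Int) (st : List (Int × Int))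
    (hp : (st.map Prod.fst).Pairwise (· > ·)) (p : Int × Int)
    (h : p ∈ st.dropWhile (fun q => decide (x ≤ q.1))) : p.1 < x := by
  induction st with
  | nil => simp at h
  | cons q rest ih =>
    simp only [List.map_cons, List.pairwise_cons] at hp
    by_cases hq : x ≤ q.1
    · simp only [List.dropWhile_cons, decide_eq_true hq, if_pos] at h
      simpa using ih hp.2 (by simpa using h)
    · simp only [List.dropWhile_cons] at h
      rw [decide_eq_false hq] at h
      simp only [Bool.false_eq_true, if_neg, not_false_iff] at h
      rcases List.mem_cons.1 h with rfl | hm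
      · omega
      · have := hp.1 p.1 (List.mem_map_of_mem hm)
        omega

theorem expand_takeWhile (x : Int) (tw : List (Int × Int))
    (hge : ∀ p ∈ tw, x ≤ p.1) (hpos : ∀ p ∈ tw, (0 : Int) ≤ p.2) :
    (expand tw).map (min x) = List.replicate ((tw.map Prod.snd).sum).toNat x := by
  induction tw with
  | nil => simp [expand]
  | cons q rest ih =>
    obtain ⟨v, k⟩ := q
    have hxv : x ≤ v := hge (v, k) (by simp)
    have hk : (0 : Int) ≤ k := hpos (v, k) (by simp)
    have hrest : (0 : Int) ≤ (rest.map Prod.snd).sum := by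
      apply List.sum_nonneg
      intro y hy
      rcases List.mem_map.1 hy with ⟨p, hp, rfl⟩
      exact hpos p (by simp [hp])
    simp only [expand, List.flatMap_cons, List.map_append, List.map_replicate]
    rw [show expand rest = rest.flatMap (fun p => List.replicate p.2.toNat p.1) from rfl] at ih
    rw [ih (fun p hp => hge p (by simp [hp])) (fun p hp => hpos p (by simp [hp]))]
    rw [show min x v = x by omega]
    rw [List.map_cons, List.sum_cons, Int.toNat_add hk hrest, ← List.replicate_add]

theorem expand_dropWhile (x : Int) (dw : List (Int × Int))
    (hlt : ∀ p ∈ dw, p.1 < x) : (expand dw).map (min x) = expand dw := by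
  induction dw with
  | nil => simp [expand]
  | cons q rest ih =>
    obtain ⟨v, k⟩ := q
    have hv : v < x := hlt (v, k) (by simp)
    simp only [expand, List.flatMap_cons, List.map_append, List.map_replicate]
    rw [show min x v = v by omega]
    rw [show expand rest = rest.flatMap (fun p => List.replicate p.2.toNat p.1) from rfl] at ih
    rw [ih (fun p hp => hlt p (by simp [hp]))]

theorem expand_append (a b : List (Int × Int)) : expand (a ++ b) = expand a ++ expand b := by
  simp [expand]

theorem inv_build (l : List Int) : StackInv l (buildStack l) := by
  induction l using List.reverseRecOn with
  | nil =>
    refine ⟨rfl, by simp [buildStack], by simp [buildStack]⟩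
  | append_singleton l x ih =>
    obtain ⟨hexp, hpair, hcnt⟩ := ih
    have hbuild : buildStack (l ++ [x]) = stepB (buildStack l) x := by
      simp [buildStack, List.foldl_append]
    set st := buildStack l with hst
    set tw := st.takeWhile (fun q => decide (x ≤ q.1)) with htw
    set dw := st.dropWhile (fun q => decide (x ≤ q.1)) with hdw
    have hsplit : st = tw ++ dw := (List.takeWhile_append_dropWhile).symm
    have htwmem : ∀ p ∈ tw, p ∈ st := fun p hp => hsplit ▸ List.mem_append_left _ hp
    have hdwmem : ∀ p ∈ dw, p ∈ st := fun p hp => hsplit ▸ List.mem_append_right _ hp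
    have htwpos : ∀ p ∈ tw, (0 : Int) ≤ p.2 := fun p hp => le_trans (by norm_num) (hcnt p (htwmem p hp))
    have hcsum : (0 : Int) ≤ (tw.map Prod.snd).sum := by
      apply List.sum_nonneg
      intro y hy
      rcases List.mem_map.1 hy with ⟨p, hp, rfl⟩
      exact htwpos p hp
    have hdwlt : ∀ p ∈ dw, p.1 < x := mem_dropWhile_lt x st hpair
    have hstep : stepB st x = (x, 1 + (tw.map Prod.snd).sum) :: dw := by
      simp [stepB, popLoop_eq, ← htw, ← hdw]
    -- the expanded new stack
    have hmapmin : (expand st).map (min x)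
        = List.replicate ((tw.map Prod.snd).sum).toNat x ++ expand dw := by
      rw [hsplit, expand_append, List.map_append,
        expand_takeWhile x tw (mem_takeWhile_ge x st) htwpos, expand_dropWhile x dw hdwlt]
    refine ⟨?_, ?_, ?_⟩
    · rw [hbuild, hstep]
      have : expand ((x, 1 + (tw.map Prod.snd).sum) :: dw)
          = x :: (List.replicate ((tw.map Prod.snd).sum).toNat x ++ expand dw) := by
        simp only [expand, List.flatMap_cons]
        rw [Int.toNat_add (by norm_num) hcsum]
        simp [List.replicate_add]
      rw [this, ← hmapmin, hexp, ← mins_some]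
      simp [mins, minO]
    · rw [hbuild, hstep]
      simp only [List.map_cons, List.pairwise_cons]
      constructor
      · intro v hv
        rcases List.mem_map.1 hv with ⟨p, hp, rfl⟩
        exact hdwlt p hp
      · exact hpair.sublist ((List.dropWhile_sublist _).map Prod.fst)
    · rw [hbuild, hstep]
      intro p hp
      rcases List.mem_cons.1 hp with rfl | hm
      · simp; omega
      · exact hcnt p (hdwmem p hm)

theorem foldl_add_map (f : Int × Int → Int) (st : List (Int × Int)) (a : Int) :
    st.foldl (fun a p => a + f p) a = a + (st.map f).sum := by
  induction st generalizing a with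
  | nil => simp
  | cons q rest ih => simp [List.foldl_cons, ih]; ring

theorem sum_expand (st : List (Int × Int)) (hpos : ∀ p ∈ st, (1 : Int) ≤ p.2) :
    (expand st).sum = (st.map (fun p => p.1 * p.2)).sum := by
  induction st with
  | nil => simp [expand]
  | cons q rest ih =>
    obtain ⟨v, k⟩ := q
    have hk : (1 : Int) ≤ k := hpos (v, k) (by simp)
    simp only [expand, List.flatMap_cons, List.sum_append, List.map_cons, List.sum_cons]
    rw [show (rest.flatMap fun p => List.replicate p.2.toNat p.1) = expand rest from rfl,
      ih (fun p hp => hpos p (by simp [hp]))]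
    simp [List.sum_replicate]
    rw [show max k 0 = k by omega]
    ring

theorem solution_spec' (grade : List Int) : solution grade = solution_alt grade := by
  obtain ⟨hexp, _, hcnt⟩ := inv_build grade
  have halt : solution_alt grade
      = grade.sum - ((buildStack grade).map (fun p => p.1 * p.2)).sum := by
    show grade.sum - List.foldl (fun a p => a + p.1 * p.2) 0 (buildStack grade) = _
    rw [foldl_add_map (fun p => p.1 * p.2) (buildStack grade) 0]
    simp
  rw [halt, ← sum_expand _ hcnt, hexp, solution_eq_sum_sub]

-- ===== VERDICT (by name: the statement is the Claim_ definition above) =====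
theorem solution_spec : Claim_equal_solution := by
  intro grade _
  unfold Spec_solution
  exact solution_spec' grade
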